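-- pv_equiv track=rewrite | github.com/Shashank-1919/Eco-AI | run_inference.py | _generate_conversational_reply
-- ===== SOURCE A (Python) =====
-- GREETINGS     = ['hi', 'hello', 'hey', 'good morning', 'good afternoon', 'howdy', 'greetings', 'what is up', 'sup', 'assalamualaikum', 'namaste']
--
-- THANKS        = ['thank you', 'thanks', 'appreciate', 'cheers', 'great', 'awesome', 'nice', 'helpful']
--
-- HOW_ARE_YOU   = ['how are you', 'how do you do', 'how are things', 'hows it going', 'how are u']
--
-- WHO_ARE_YOU   = ['what are you', 'who are you', 'what is your name', 'your name', 'tell me about yourself', 'identify']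
--
-- CAPABILITIES  = ['what can you do', 'how do you work', 'what do you know', 'features', 'capabilities', 'how does this work', 'help me']
--
-- EXAMPLES      = ['example', 'show me', 'demo', 'sample', 'give me an example', 'case study']
--
-- def _generate_conversational_reply(text: str) -> dict | None:
--     tl = text.lower().strip()
--
--     if any(tl.startswith(g) or tl == g for g in GREETINGS):
--         return {"reply": "Hello! I'm **Eco-AI**, your premium renewable energy advisor. I can help you find the best clean energy source for your home or business based on your location and budget. How can I assist you today?"}
--
--     if any(t in tl for t in THANKS) and len(tl) < 30:
--         return {"reply": "You're very welcome! I'm glad I could help. Do you have any more questions about renewable energy or environmental conditions?"}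
--
--     if any(h in tl for h in HOW_ARE_YOU):
--         return {"reply": "I'm functioning perfectly and ready for some environmental data! Is there a specific location or budget you'd like me to analyze for energy potential?"}
--
--     if any(w in tl for w in WHO_ARE_YOU):
--         return {"reply": "I'm **Eco-AI** — a fuzzy logic-powered renewable energy advisor. I evaluate Solar, Wind, Hydro, Biomass, Geothermal, and Tidal energy for your specific conditions and rank them by suitability!"}
--
--     if any(c in tl for c in CAPABILITIES):
--         return {"reply": "I analyse 8 environmental factors to rank renewable energy sources:\n\nTemperature, Humidity, Budget, Wind Speed, Solar Irradiance, Water Availability, Biomass, Location Type\n\nTry: *\"Coastal area, 10 m/s wind, ₹8 lakh budget, humid\"*"}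
--
--     if any(e in tl for e in EXAMPLES):
--         return {"reply": "Here are some example queries you can try:\n\n• *\"Coastal area, windy, ₹5 lakh budget, temperature 28°C, humidity 75%\"*\n• *\"Rural farm with forest nearby, ₹2 lakh, moderate sun\"*\n• *\"Mountain location, river nearby, ₹10 lakh budget\"*\n• *\"Desert area, very sunny, ₹3 lakh\"*"}
--
--     return None
-- ===== SOURCE B (Python) =====
-- # B: flattens every keyword into one (keyword, category) list, makes a single full pass
-- # computing the minimal matching category (no per-rule early return), then indexes a reply table.
-- GREETINGS     = ['hi', 'hello', 'hey', 'good morning', 'good afternoon', 'howdy', 'greetings', 'what is up', 'sup', 'assalamualaikum', 'namaste']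
-- THANKS        = ['thank you', 'thanks', 'appreciate', 'cheers', 'great', 'awesome', 'nice', 'helpful']
-- HOW_ARE_YOU   = ['how are you', 'how do you do', 'how are things', 'hows it going', 'how are u']
-- WHO_ARE_YOU   = ['what are you', 'who are you', 'what is your name', 'your name', 'tell me about yourself', 'identify']
-- CAPABILITIES  = ['what can you do', 'how do you work', 'what do you know', 'features', 'capabilities', 'how does this work', 'help me']
-- EXAMPLES      = ['example', 'show me', 'demo', 'sample', 'give me an example', 'case study']
--
-- _REPLIES = [
--     "Hello! I'm **Eco-AI**, your premium renewable energy advisor. I can help you find the best clean energy source for your home or business based on your location and budget. How can I assist you today?",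
--     "You're very welcome! I'm glad I could help. Do you have any more questions about renewable energy or environmental conditions?",
--     "I'm functioning perfectly and ready for some environmental data! Is there a specific location or budget you'd like me to analyze for energy potential?",
--     "I'm **Eco-AI** — a fuzzy logic-powered renewable energy advisor. I evaluate Solar, Wind, Hydro, Biomass, Geothermal, and Tidal energy for your specific conditions and rank them by suitability!",
--     "I analyse 8 environmental factors to rank renewable energy sources:\n\nTemperature, Humidity, Budget, Wind Speed, Solar Irradiance, Water Availability, Biomass, Location Type\n\nTry: *\"Coastal area, 10 m/s wind, \u20b98 lakh budget, humid\"*",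
--     "Here are some example queries you can try:\n\n\u2022 *\"Coastal area, windy, \u20b95 lakh budget, temperature 28\u00b0C, humidity 75%\"*\n\u2022 *\"Rural farm with forest nearby, \u20b92 lakh, moderate sun\"*\n\u2022 *\"Mountain location, river nearby, \u20b910 lakh budget\"*\n\u2022 *\"Desert area, very sunny, \u20b93 lakh\"*",
-- ]
--
-- _KEYWORD_CATS = (
--     [(g, 0) for g in GREETINGS]
--     + [(t, 1) for t in THANKS]
--     + [(h, 2) for h in HOW_ARE_YOU]
--     + [(w, 3) for w in WHO_ARE_YOU]
--     + [(c, 4) for c in CAPABILITIES]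
--     + [(e, 5) for e in EXAMPLES]
-- )
--
-- def _hit(tl, kw, cat):
--     if cat == 0:
--         return tl.startswith(kw)
--     if cat == 1:
--         return len(tl) < 30 and kw in tl
--     return kw in tl
--
-- def _generate_conversational_reply(text: str) -> dict | None:
--     tl = text.lower().strip()
--     best = None
--     for kw, cat in _KEYWORD_CATS:
--         if _hit(tl, kw, cat) and (best is None or cat < best):
--             best = cat
--     if best is None:
--         return None
--     return {"reply": _REPLIES[best]}
-- ===== Notes on version B (the rewrite author's own statement) =====
-- stated objective: alternative
-- what changed: B flattens all six keyword lists into one (keyword, category) list, makes a single full pass over it computing the minimal matching category with an accumulator (no per-rule early return), and indexes a reply table with that minimum; A is a chain of six short-circuiting if-statements each running its own any() scan.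
import Mathlib
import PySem

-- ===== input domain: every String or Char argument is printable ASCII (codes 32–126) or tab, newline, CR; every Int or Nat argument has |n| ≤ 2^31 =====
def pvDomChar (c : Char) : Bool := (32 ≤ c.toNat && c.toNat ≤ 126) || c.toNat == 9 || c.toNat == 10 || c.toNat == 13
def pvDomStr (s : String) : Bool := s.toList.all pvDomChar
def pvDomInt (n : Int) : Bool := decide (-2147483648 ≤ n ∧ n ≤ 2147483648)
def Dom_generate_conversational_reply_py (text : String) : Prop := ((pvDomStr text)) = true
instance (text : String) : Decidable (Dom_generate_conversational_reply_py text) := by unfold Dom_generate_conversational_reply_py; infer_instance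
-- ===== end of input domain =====

-- B replaces A's chain of six short-circuiting if-statements by a single full pass over one
-- flat (keyword, category) list computing the minimal matching category, then a reply-table lookup.

-- ===== PORT A =====
def pvGreetings : List String := ["hi", "hello", "hey", "good morning", "good afternoon", "howdy", "greetings", "what is up", "sup", "assalamualaikum", "namaste"]
def pvThanks : List String := ["thank you", "thanks", "appreciate", "cheers", "great", "awesome", "nice", "helpful"]
def pvHowAreYou : List String := ["how are you", "how do you do", "how are things", "hows it going", "how are u"]
def pvWhoAreYou : List String := ["what are you", "who are you", "what is your name", "your name", "tell me about yourself", "identify"]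
def pvCapabilities : List String := ["what can you do", "how do you work", "what do you know", "features", "capabilities", "how does this work", "help me"]
def pvExamples : List String := ["example", "show me", "demo", "sample", "give me an example", "case study"]

def pvReplyGreet : String := "Hello! I'm **Eco-AI**, your premium renewable energy advisor. I can help you find the best clean energy source for your home or business based on your location and budget. How can I assist you today?"
def pvReplyThanks : String := "You're very welcome! I'm glad I could help. Do you have any more questions about renewable energy or environmental conditions?"
def pvReplyHow : String := "I'm functioning perfectly and ready for some environmental data! Is there a specific location or budget you'd like me to analyze for energy potential?"
def pvReplyWho : String := "I'm **Eco-AI** — a fuzzy logic-powered renewable energy advisor. I evaluate Solar, Wind, Hydro, Biomass, Geothermal, and Tidal energy for your specific conditions and rank them by suitability!"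
def pvReplyCap : String := "I analyse 8 environmental factors to rank renewable energy sources:\n\nTemperature, Humidity, Budget, Wind Speed, Solar Irradiance, Water Availability, Biomass, Location Type\n\nTry: *\"Coastal area, 10 m/s wind, ₹8 lakh budget, humid\"*"
def pvReplyEx : String := "Here are some example queries you can try:\n\n• *\"Coastal area, windy, ₹5 lakh budget, temperature 28°C, humidity 75%\"*\n• *\"Rural farm with forest nearby, ₹2 lakh, moderate sun\"*\n• *\"Mountain location, river nearby, ₹10 lakh budget\"*\n• *\"Desert area, very sunny, ₹3 lakh\"*"

def generate_conversational_reply_py (text : String) : Option (List (String × String)) :=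
  let tl := PySem.Str.strip (PySem.Str.lower text)
  if pvGreetings.any (fun g => PySem.Str.startswith tl g || tl == g) then
    some [("reply", pvReplyGreet)]
  else if pvThanks.any (fun t => PySem.Str.isIn t tl) && decide (PySem.Str.len tl < 30) then
    some [("reply", pvReplyThanks)]
  else if pvHowAreYou.any (fun h => PySem.Str.isIn h tl) then
    some [("reply", pvReplyHow)]
  else if pvWhoAreYou.any (fun w => PySem.Str.isIn w tl) then
    some [("reply", pvReplyWho)]
  else if pvCapabilities.any (fun c => PySem.Str.isIn c tl) then
    some [("reply", pvReplyCap)]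
  else if pvExamples.any (fun e => PySem.Str.isIn e tl) then
    some [("reply", pvReplyEx)]
  else
    none

-- ===== PORT B =====
def pvReplies : List String := [pvReplyGreet, pvReplyThanks, pvReplyHow, pvReplyWho, pvReplyCap, pvReplyEx]

def pvKeywordCats : List (String × Nat) :=
  pvGreetings.map (fun g => (g, 0)) ++ pvThanks.map (fun t => (t, 1)) ++
  pvHowAreYou.map (fun h => (h, 2)) ++ pvWhoAreYou.map (fun w => (w, 3)) ++
  pvCapabilities.map (fun c => (c, 4)) ++ pvExamples.map (fun e => (e, 5))

def pvHit (tl kw : String) (cat : Nat) : Bool :=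
  match cat with
  | 0 => PySem.Str.startswith tl kw
  | 1 => decide (PySem.Str.len tl < 30) && PySem.Str.isIn kw tl
  | _ => PySem.Str.isIn kw tl

-- the loop body: update `best` when this keyword hits and its category improves the minimum
def pvStep (tl : String) (best : Option Nat) (p : String × Nat) : Option Nat :=
  if pvHit tl p.1 p.2 && (match best with | none => true | some b => decide (p.2 < b)) then
    some p.2
  else best

def generate_conversational_reply_py_alt (text : String) : Option (List (String × String)) :=
  let tl := PySem.Str.strip (PySem.Str.lower text)
  match pvKeywordCats.foldl (pvStep tl) none with
  | none => none
  | some best => some [("reply", pvReplies.getD best "")]  -- best is always a valid index 0..5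

-- ===== PRECONDITION & SPEC =====
def Spec_generate_conversational_reply_py (text : String) (out : Option (List (String × String))) : Prop := out = generate_conversational_reply_py_alt text
instance (text : String) (out : Option (List (String × String))) : Decidable (Spec_generate_conversational_reply_py text out) := by unfold Spec_generate_conversational_reply_py; infer_instance

-- ===== CLAIM =====
def Claim_equal_generate_conversational_reply_py : Prop := ∀ (text : String), Dom_generate_conversational_reply_py text → Spec_generate_conversational_reply_py text (generate_conversational_reply_py text)

-- ===== LEMMAS AND PROOFS =====

-- folding pvStep over one constant-category block: updates the minimum iff some keyword hits
-- and the category beats the accumulator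
lemma pv_fold_block (tl : String) (c : Nat) (L : List String) (acc : Option Nat) :
    (L.map (fun k => (k, c))).foldl (pvStep tl) acc =
      if L.any (fun k => pvHit tl k c) &&
         (match acc with | none => true | some b => decide (c < b)) then some c else acc := by
  induction L generalizing acc with
  | nil => simp
  | cons k rest ih =>
    simp only [List.map, List.foldl, List.any_cons]
    rw [ih]
    simp only [pvStep]
    rcases Bool.dichotomy (pvHit tl k c) with h1 | h1
    · simp [h1]
    · cases acc with
      | none => simp [h1]
      | some b =>
        by_cases hc : c < b
        · simp [h1, hc]
        · simp [h1, hc]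

-- equality implies prefix, so A's greeting test (prefix-or-equal) collapses to B's prefix test
lemma pv_startswith_or_eq (tl g : String) :
    (PySem.Str.startswith tl g || (tl == g)) = PySem.Str.startswith tl g := by
  cases h : (tl == g) with
  | false => simp
  | true =>
    have he : tl = g := eq_of_beq h
    subst he
    have hs : PySem.Chars.startswith tl.toList tl.toList = true :=
      (PySem.Chars.startswith_iff _ _).mpr (List.prefix_refl _)
    simp [hs]

-- A's thanks test 'any … && len < 30' equals B's per-keyword 'len < 30 && …' pulled out of any
lemma pv_thanks_any (tl : String) (L : List String) :
    L.any (fun k => decide (PySem.Str.len tl < 30) && PySem.Str.isIn k tl) =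
    (L.any (fun k => PySem.Str.isIn k tl) && decide (PySem.Str.len tl < 30)) := by
  cases h : decide (PySem.Str.len tl < 30) <;> simp_all

-- ===== VERDICT =====
theorem generate_conversational_reply_py_spec : Claim_equal_generate_conversational_reply_py := by
  intro text _
  unfold Spec_generate_conversational_reply_py
  unfold generate_conversational_reply_py generate_conversational_reply_py_alt
  simp only []
  generalize PySem.Str.strip (PySem.Str.lower text) = tl
  have hfold : pvKeywordCats.foldl (pvStep tl) none =
      (pvExamples.map (fun k => (k, 5))).foldl (pvStep tl)
      ((pvCapabilities.map (fun k => (k, 4))).foldl (pvStep tl)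
      ((pvWhoAreYou.map (fun k => (k, 3))).foldl (pvStep tl)
      ((pvHowAreYou.map (fun k => (k, 2))).foldl (pvStep tl)
      ((pvThanks.map (fun k => (k, 1))).foldl (pvStep tl)
      ((pvGreetings.map (fun k => (k, 0))).foldl (pvStep tl) none))))) := by
    simp [pvKeywordCats, List.foldl_append]
  rw [hfold]
  rw [pv_fold_block, pv_fold_block, pv_fold_block, pv_fold_block, pv_fold_block, pv_fold_block]
  have hg : pvGreetings.any (fun g => PySem.Str.startswith tl g || tl == g) =
      pvGreetings.any (fun g => pvHit tl g 0) := by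
    simp only [pv_startswith_or_eq]; rfl
  have ht : (pvThanks.any (fun t => PySem.Str.isIn t tl) && decide (PySem.Str.len tl < 30)) =
      pvThanks.any (fun t => pvHit tl t 1) := by
    show _ = pvThanks.any (fun t => decide (PySem.Str.len tl < 30) && PySem.Str.isIn t tl)
    rw [pv_thanks_any]
  rw [hg, ht]
  have hh : (pvHowAreYou.any fun h => PySem.Str.isIn h tl) = pvHowAreYou.any (fun h => pvHit tl h 2) := rfl
  have hw : (pvWhoAreYou.any fun w => PySem.Str.isIn w tl) = pvWhoAreYou.any (fun w => pvHit tl w 3) := rfl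
  have hc : (pvCapabilities.any fun c => PySem.Str.isIn c tl) = pvCapabilities.any (fun c => pvHit tl c 4) := rfl
  have he : (pvExamples.any fun e => PySem.Str.isIn e tl) = pvExamples.any (fun e => pvHit tl e 5) := rfl
  rw [hh, hw, hc, he]
  generalize pvGreetings.any (fun g => pvHit tl g 0) = b1
  generalize pvThanks.any (fun t => pvHit tl t 1) = b2
  generalize pvHowAreYou.any (fun h => pvHit tl h 2) = b3
  generalize pvWhoAreYou.any (fun w => pvHit tl w 3) = b4
  generalize pvCapabilities.any (fun c => pvHit tl c 4) = b5
  generalize pvExamples.any (fun e => pvHit tl e 5) = b6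
  cases b1 <;> cases b2 <;> cases b3 <;> cases b4 <;> cases b5 <;> cases b6 <;> rfl
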